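-- pv_equiv track=rewrite | github.com/umr-lops/auto-kerchunk | auto_kerchunk/combine.py | sliced
-- ===== SOURCE A (Python) =====
-- import itertools
--
-- def sliced(seq, n):
--     steps = range(0, len(seq), n)
--     previous, next_ = itertools.tee(steps, 2)
--     next_ = itertools.islice(next_, 1, None)
--     slices_ = (
--         slice(start, stop) for start, stop in itertools.zip_longest(previous, next_)
--     )
--
--     for slice_ in slices_:
--         yield seq[slice_]
-- ===== SOURCE B (Python) =====
-- def sliced(seq, n):
--     if n > 0:
--         while seq:
--             yield seq[:n]
--             seq = seq[n:]
-- ===== Notes on version B (the rewrite author's own statement) =====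
-- stated objective: simpler
-- what changed: Replaces the range/tee/islice/zip_longest boundary-pairing pipeline over indices with an index-free peeling loop that repeatedly yields the first n elements (seq[:n]) and continues on the remainder (seq[n:]) until the sequence is exhausted.
import Mathlib
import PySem

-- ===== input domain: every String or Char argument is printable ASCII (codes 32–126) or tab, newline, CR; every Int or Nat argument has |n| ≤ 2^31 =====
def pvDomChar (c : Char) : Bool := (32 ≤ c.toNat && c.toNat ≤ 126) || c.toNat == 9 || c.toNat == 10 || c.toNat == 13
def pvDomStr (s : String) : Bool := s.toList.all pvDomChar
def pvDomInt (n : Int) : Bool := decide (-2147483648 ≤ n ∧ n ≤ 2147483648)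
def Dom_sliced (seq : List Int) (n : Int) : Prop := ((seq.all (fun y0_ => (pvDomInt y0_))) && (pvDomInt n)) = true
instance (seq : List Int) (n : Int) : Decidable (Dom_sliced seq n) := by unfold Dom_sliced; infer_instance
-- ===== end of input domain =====

-- B replaces A's range/tee/islice/zip_longest boundary-pairing pipeline over indices
-- with an index-free peeling loop: while the sequence is nonempty, yield seq[:n] and
-- continue on seq[n:] (objective: simpler). Both are generators in Python; the
-- equivalence is about the produced sequence of chunks.

-- ===== PORT A =====
-- itertools.zip_longest(previous, next_) with fillvalue None (both sides as Options)
def pvZipLongest : List Int → List Int → List (Option Int × Option Int)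
  | [], [] => []
  | x :: xs, [] => (some x, none) :: pvZipLongest xs []
  | [], y :: ys => (none, some y) :: pvZipLongest [] ys
  | x :: xs, y :: ys => (some x, some y) :: pvZipLongest xs ys

def sliced (seq : List Int) (n : Int) : List (List Int) :=
  let steps := PySem.List.pyRange 0 (PySem.List.len seq) n
  let previous := steps                  -- itertools.tee(steps, 2), first copy
  let next_ := steps.drop 1              -- itertools.islice(second copy, 1, None)
  -- slices_ = (slice(start, stop) for start, stop in zip_longest(previous, next_));
  -- yield seq[slice_] for each
  (pvZipLongest previous next_).map (fun p => PySem.List.slice seq p.1 p.2)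

-- ===== PORT B =====
-- the 'while seq:' loop: peel off seq[:n], continue with seq[n:]
def slicedPeel (n : Int) (hn : 0 < n) (s : List Int) : List (List Int) :=
  if h : s = [] then []
  else PySem.List.slice s none (some n) :: slicedPeel n hn (PySem.List.slice s (some n) none)
termination_by s.length
decreasing_by
  rw [PySem.List.slice_from s (le_of_lt hn)]
  simp only [List.length_drop]
  have h1 : 1 ≤ n.toNat := by omega
  have h2 : s.length ≠ 0 := fun h0 => h (List.eq_nil_of_length_eq_zero h0)
  omega

def sliced_alt (seq : List Int) (n : Int) : List (List Int) :=
  if hn : 0 < n then slicedPeel n hn seq else []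

-- ===== PRECONDITION & SPEC =====
-- Pre_ excludes n = 0, on which Python's range(0, len(seq), 0) raises ValueError in A
-- (on first iteration of the generator).
def Pre_sliced (_seq : List Int) (n : Int) : Prop := n ≠ 0
instance (seq : List Int) (n : Int) : Decidable (Pre_sliced seq n) := by unfold Pre_sliced; infer_instance

def pvWitness_sliced : List Int × Int := ([1, 2, 3, 4, 5], 2)

def Spec_sliced (seq : List Int) (n : Int) (out : List (List Int)) : Prop := out = sliced_alt seq n
instance (seq : List Int) (n : Int) (out : List (List Int)) : Decidable (Spec_sliced seq n out) := by unfold Spec_sliced; infer_instance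

-- ===== CLAIM (what is proved, stated in full; the proofs are below) =====
def Claim_equal_sliced : Prop := ∀ (seq : List Int) (n : Int), Dom_sliced seq n → Pre_sliced seq n → Spec_sliced seq n (sliced seq n)

-- ===== LEMMAS AND PROOFS =====

-- range(a, b, s) with positive step s is empty when b ≤ a
theorem pvRange_pos_nil {s : Int} (a b : Int) (hs : 0 < s) (h : b ≤ a) :
    PySem.List.pyRange a b s = [] := by
  rw [PySem.List.pyRange_of_pos a b hs, if_neg (by omega)]
  simp

-- range(a, b, s) with negative step s is empty when a ≤ b
theorem pvRange_neg_nil {s : Int} (a b : Int) (hs : s < 0) (h : a ≤ b) :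
    PySem.List.pyRange a b s = [] := by
  rw [PySem.List.pyRange_of_neg a b hs, if_neg (by omega)]
  simp

-- range(a, b, s) with positive step s and a < b starts with a and continues from a + s
theorem pvRange_pos_cons {s : Int} (a b : Int) (hs : 0 < s) (h : a < b) :
    PySem.List.pyRange a b s = a :: PySem.List.pyRange (a + s) b s := by
  rw [PySem.List.pyRange_of_pos a b hs, PySem.List.pyRange_of_pos (a + s) b hs,
      if_pos h]
  have hcount : ((b - a + s - 1) / s).toNat
      = (if a + s < b then ((b - (a + s) + s - 1) / s).toNat else 0) + 1 := by
    by_cases hc : a + s < b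
    · rw [if_pos hc]
      have h1 : (b - a + s - 1) / s = (b - (a + s) + s - 1) / s + 1 := by
        have : b - a + s - 1 = (b - (a + s) + s - 1) + 1 * s := by ring
        rw [this, Int.add_mul_ediv_right _ _ (by omega)]
      have h2 : 0 ≤ (b - (a + s) + s - 1) / s := Int.ediv_nonneg (by omega) (by omega)
      omega
    · rw [if_neg hc]
      have h1 : (b - a + s - 1) / s = 1 := by
        rw [← PySem.Int.floordiv_eq_ediv_of_pos hs,
            PySem.Int.floordiv_eq_iff_of_pos hs]
        constructor <;> nlinarith
      omega
  rw [hcount, List.range_succ_eq_map]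
  simp only [List.map_cons, List.map_map]
  congr 1
  · ring_nf
  · apply List.map_congr_left
    intro k _
    simp only [Function.comp]
    push_cast
    ring

-- translating a positive-step range: range(c, b, n) = [j + c for j in range(0, b - c, n)]
theorem pvRange_shift (c b n : Int) (hn : 0 < n) :
    PySem.List.pyRange c b n = (PySem.List.pyRange 0 (b - c) n).map (· + c) := by
  rw [PySem.List.pyRange_of_pos c b hn, PySem.List.pyRange_of_pos 0 (b - c) hn, List.map_map]
  have hcnt : (if (0:Int) < b - c then ((b - c - 0 + n - 1) / n).toNat else 0)
      = (if c < b then ((b - c + n - 1) / n).toNat else 0) := by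
    by_cases h : c < b
    · rw [if_pos (by omega : (0:Int) < b - c), if_pos h]
      congr 1
      ring_nf
    · rw [if_neg (by omega), if_neg h]
  rw [hcnt]
  apply List.map_congr_left
  intro k _
  simp only [Function.comp]
  ring

-- core invariant for A: for positive n and 0 ≤ a, A's zip_longest pairing over the step
-- list starting at a produces exactly the clamped slices seq[i:i+n]
theorem pv_main (seq : List Int) (n : Int) (hn : 0 < n) :
    ∀ (L : List Int) (a : Int), 0 ≤ a →
      L = PySem.List.pyRange a (PySem.List.len seq) n →
      (pvZipLongest L (L.drop 1)).map (fun p => PySem.List.slice seq p.1 p.2)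
        = L.map (fun i => PySem.List.slice seq (some i) (some (i + n))) := by
  intro L
  induction L with
  | nil => intro a _ _; simp [pvZipLongest]
  | cons x L ih =>
    intro a ha hL
    have hlen : a < PySem.List.len seq := by
      by_contra hc
      rw [pvRange_pos_nil a _ hn (by omega)] at hL
      exact List.cons_ne_nil _ _ hL
    rw [pvRange_pos_cons a _ hn hlen] at hL
    injection hL with hx hL
    subst hx
    have hlenseq : PySem.List.len seq = (seq.length : Int) := PySem.List.len_eq seq
    cases L with
    | nil =>
      -- last chunk: seq[a:] (A) versus seq[a:a+n] (B); they agree because len ≤ x + n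
      have hub : PySem.List.len seq ≤ x + n := by
        by_contra hc
        rw [pvRange_pos_cons (x + n) _ hn (by omega)] at hL
        exact List.cons_ne_nil _ _ hL.symm
      simp only [pvZipLongest, List.drop, List.map]
      rw [PySem.List.slice_from seq ha,
          PySem.List.slice_toNat seq ha (by omega : (0:Int) ≤ x + n)]
      have : (seq.drop x.toNat).length ≤ (x + n).toNat - x.toNat := by
        simp only [List.length_drop]
        omega
      rw [List.take_of_length_le this]
    | cons y L' =>
      have hy : y = x + n := by
        have hlt : x + n < PySem.List.len seq := by
          by_contra hc
          rw [pvRange_pos_nil (x + n) _ hn (by omega)] at hL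
          exact List.cons_ne_nil _ _ hL
        rw [pvRange_pos_cons (x + n) _ hn hlt] at hL
        exact (List.cons_eq_cons.mp hL).1
      simp only [List.drop_one, List.tail_cons, pvZipLongest, List.map_cons]
      congr 1
      · rw [hy]
      · have := ih (x + n) (by omega) hL
        simpa [List.drop_one] using this

-- core invariant for B: the peeling loop produces exactly the clamped slices seq[i:i+n]
theorem pv_peel (n : Int) (hn : 0 < n) :
    ∀ (m : Nat) (s : List Int), s.length ≤ m →
      slicedPeel n hn s
        = (PySem.List.pyRange 0 (PySem.List.len s) n).map
            (fun i => PySem.List.slice s (some i) (some (i + n))) := by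
  intro m
  induction m with
  | zero =>
    intro s hs
    have : s = [] := List.eq_nil_of_length_eq_zero (by omega)
    subst this
    rw [slicedPeel]
    simp [pvRange_pos_nil 0 0 hn le_rfl]
  | succ m ih =>
    intro s hs
    by_cases hnil : s = []
    · subst hnil
      rw [slicedPeel]
      simp [pvRange_pos_nil 0 0 hn le_rfl]
    · rw [slicedPeel, dif_neg hnil]
      have hlen : PySem.List.len s = (s.length : Int) := PySem.List.len_eq s
      have hpos : (0:Int) < PySem.List.len s := by
        rw [hlen]
        have : s.length ≠ 0 := fun h0 => hnil (List.eq_nil_of_length_eq_zero h0)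
        omega
      rw [pvRange_pos_cons 0 _ hn hpos, List.map_cons]
      rw [PySem.List.slice_from s (le_of_lt hn)]
      congr 1
      · -- head chunk: seq[:n] = seq[0:0+n]
        rw [PySem.List.slice_toNat s le_rfl (by omega : (0:Int) ≤ 0 + n)]
        rw [PySem.List.slice_to s (le_of_lt hn)]
        simp
      · -- tail: peel the remainder t = s.drop n.toNat
        set t := s.drop n.toNat with ht
        have hlt : t.length ≤ m := by
          rw [ht]
          simp only [List.length_drop]
          have : s.length ≠ 0 := fun h0 => hnil (List.eq_nil_of_length_eq_zero h0)
          omega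
        rw [ih t hlt]
        have hlent : PySem.List.len t = PySem.List.len s - n ∨ (PySem.List.len s ≤ n ∧ t = []) := by
          by_cases hc : n.toNat ≤ s.length
          · left
            rw [PySem.List.len_eq, ht, List.length_drop, hlen]
            omega
          · right
            constructor
            · omega
            · rw [ht, List.drop_eq_nil_iff]
              omega
        rcases hlent with hlent | ⟨hle, htnil⟩
        · rw [hlent, show (0:Int) + n = n by ring,
              pvRange_shift n (PySem.List.len s) n hn,
              show PySem.List.len s - n = PySem.List.len s - n from rfl,
              List.map_map]
          apply List.map_congr_left
          intro j hj
          have hj0 : 0 ≤ j := by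
            have := (PySem.List.mem_pyRange_iff_of_pos hn j).mp hj
            omega
          simp only [Function.comp]
          rw [PySem.List.slice_toNat s (by omega : (0:Int) ≤ j + n) (by omega : (0:Int) ≤ j + n + n),
              PySem.List.slice_toNat t hj0 (by omega : (0:Int) ≤ j + n), ht,
              List.drop_drop]
          congr 1
          · omega
          · congr 1
            omega
        · rw [htnil, show (0:Int) + n = n by ring, pvRange_pos_nil n _ hn hle]
          simp [pvRange_pos_nil 0 0 hn le_rfl]

-- ===== VERDICT (by name: the statement is the Claim_ definition above) =====
theorem sliced_spec : Claim_equal_sliced := by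
  intro seq n _ hpre
  unfold Spec_sliced sliced sliced_alt
  rcases lt_or_gt_of_ne (hpre : n ≠ 0) with hneg | hpos
  · rw [dif_neg (by omega : ¬ (0:Int) < n)]
    rw [pvRange_neg_nil 0 _ hneg (by rw [PySem.List.len_eq]; positivity)]
    simp [pvZipLongest]
  · rw [dif_pos hpos]
    rw [pv_main seq n hpos _ 0 le_rfl rfl]
    exact (pv_peel n hpos seq.length seq le_rfl).symm
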